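-- pv_equiv track=rewrite | github.com/anton-gendra/crypto-csai | vigenere_cryptanalysis/vigenere.py | key_lengths
-- ===== SOURCE A (Python) =====
-- def get_divs(_int):
--     yield _int
--     for i in range(2, int(_int / 2) + 1):
--         mod = _int % i
--         if mod == 0:
--             yield i
--
-- def key_lengths(int_list):
--     occurrences = {}
--     for _int in int_list:
--         divs = list(get_divs(_int))
--         for div in divs:
--             if div in occurrences:
--                 occurrences[div] += 1
--             else:
--                 occurrences.update({div: 1})
--
--     return [key
--             for key, ocurrence in reversed(sorted(occurrences.items(), key=lambda item: item[1]))
--             if ocurrence != 1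
--             ] + [1]
-- ===== SOURCE B (Python) =====
-- def _divisors(n):
--     # [n] followed by every divisor d of n with 2 <= d <= n//2, in increasing
--     # order, found by trial division up to sqrt(n) with cofactor pairing.
--     small = []
--     large = []
--     i = 2
--     while i * i <= n:
--         if n % i == 0:
--             small.append(i)
--             q = n // i
--             if q != i:
--                 large.append(q)
--         i += 1
--     return [n] + small + large[::-1]
--
-- def key_lengths(int_list):
--     counts = {}
--     for n in int_list:
--         for d in _divisors(n):
--             counts[d] = counts.get(d, 0) + 1
--     out = [1]
--     for k, c in sorted(counts.items(), key=lambda kv: kv[1]):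
--         if c != 1:
--             out = [k] + out
--     return out
-- ===== Notes on version B (the rewrite author's own statement) =====
-- stated objective: faster
-- what changed: Divisors of each integer are found by trial division only up to sqrt(n) with cofactor pairing (small/large lists merged in order) instead of scanning every candidate up to n/2, counts are accumulated with dict.get(d,0)+1 instead of a membership-tested two-branch update, and the ranked output is built back-to-front by a single fold over the ascending sort instead of reversing and filtering it.
import Mathlib
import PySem

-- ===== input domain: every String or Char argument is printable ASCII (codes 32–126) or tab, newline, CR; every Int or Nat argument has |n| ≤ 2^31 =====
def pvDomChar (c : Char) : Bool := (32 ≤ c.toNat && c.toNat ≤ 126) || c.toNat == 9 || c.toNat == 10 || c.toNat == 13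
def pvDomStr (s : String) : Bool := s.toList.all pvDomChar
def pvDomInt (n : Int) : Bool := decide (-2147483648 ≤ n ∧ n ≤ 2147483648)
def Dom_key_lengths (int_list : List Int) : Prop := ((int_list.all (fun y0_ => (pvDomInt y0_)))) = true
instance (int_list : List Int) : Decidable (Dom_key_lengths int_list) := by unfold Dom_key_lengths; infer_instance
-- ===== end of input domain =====

-- B replaces A's trial division up to _int/2 by a divisor-pairing scan up to sqrt(_int)
-- and builds the ranked output back-to-front in one fold (objective: faster).

-- ===== PORT A =====
-- generator get_divs(_int), consumed by list(): first _int itself, then every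
-- i in range(2, int(_int/2)+1) with _int % i == 0.
-- int(_int / 2) truncates float division toward zero: exact for |_int| ≤ 2^31 (< 2^53), = PySem.Int.truncdiv.
def get_divs (n : Int) : List Int :=
  n :: (PySem.List.pyRange 2 (PySem.Int.truncdiv n 2 + 1) 1).filter
        (fun i => PySem.Int.mod n i == 0)

def key_lengths (int_list : List Int) : List Int :=
  let occurrences : PySem.Dict Int Int := int_list.foldl (fun occ _int =>
    let divs := get_divs _int
    divs.foldl (fun occ div =>
      if occ.contains div then
        occ.insert div (occ.getD div 0 + 1)      -- occurrences[div] += 1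
      else
        occ.insert div 1) occ) PySem.Dict.empty  -- occurrences.update({div: 1})
  ((PySem.List.sorted occurrences.items (fun item => item.2) false).reverse.filter
      (fun kv => kv.2 ≠ 1)).map (fun kv => kv.1) ++ [1]

-- ===== PORT B =====
-- termination of the while loop: i*i ≤ n forces i ≤ n+1, so n+2-i shrinks
theorem pv_divloop_dec (n i : Int) (h : i * i ≤ n) :
    (n + 2 - (i + 1)).toNat < (n + 2 - i).toNat := by
  have h0 : 0 ≤ i * i := mul_self_nonneg i
  rcases Int.lt_or_le i 1 with hi | hi
  · omega
  · have : i ≤ i * i := by nlinarith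
    omega

-- the while-loop of _divisors: i walks 2,3,… while i*i <= n, emitting i into
-- small and the cofactor q = n // i into large (in loop order).
def pvDivLoop (n i : Int) : List Int × List Int :=
  if h : i * i ≤ n then
    let rest := pvDivLoop n (i + 1)
    if PySem.Int.mod n i == 0 then
      let q := PySem.Int.floordiv n i
      if q ≠ i then (i :: rest.1, q :: rest.2) else (i :: rest.1, rest.2)
    else rest
  else ([], [])
termination_by (n + 2 - i).toNat
decreasing_by exact pv_divloop_dec n i h

def pvDivisors (n : Int) : List Int :=
  let p := pvDivLoop n 2
  n :: (p.1 ++ p.2.reverse)      -- [n] + small + large[::-1]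

def key_lengths_alt (int_list : List Int) : List Int :=
  let counts : PySem.Dict Int Int := int_list.foldl (fun c n =>
    (pvDivisors n).foldl (fun c d => c.insert d (c.getD d 0 + 1)) c) PySem.Dict.empty
  (PySem.List.sorted counts.items (fun kv => kv.2) false).foldl
    (fun out kv => if kv.2 ≠ 1 then kv.1 :: out else out) [1]

-- ===== PRECONDITION & SPEC =====
def Spec_key_lengths (int_list : List Int) (out : List Int) : Prop := out = key_lengths_alt int_list
instance (int_list : List Int) (out : List Int) : Decidable (Spec_key_lengths int_list out) := by unfold Spec_key_lengths; infer_instance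

-- ===== CLAIM (what is proved, stated in full; the proofs are below) =====
def Claim_equal_key_lengths : Prop := ∀ (int_list : List Int), Dom_key_lengths int_list → Spec_key_lengths int_list (key_lengths int_list)

-- ===== LEMMAS AND PROOFS =====

-- membership in the small-divisor list of the loop
theorem pv_mem_fst (n i d : Int) :
    2 ≤ i → (d ∈ (pvDivLoop n i).1 ↔ i ≤ d ∧ d * d ≤ n ∧ PySem.Int.mod n d = 0) := by
  induction i using pvDivLoop.induct n with
  | case1 x hsq hmod q hq ih =>
    intro hi
    rw [pvDivLoop]
    have hq' : PySem.Int.floordiv n x ≠ x := hq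
    simp only [dif_pos hsq, if_pos hmod, if_pos hq', List.mem_cons]
    rw [ih (by omega)]
    constructor
    · rintro (rfl | ⟨h1, h2, h3⟩)
      · exact ⟨le_refl _, hsq, by simpa using hmod⟩
      · exact ⟨by omega, h2, h3⟩
    · rintro ⟨h1, h2, h3⟩
      rcases eq_or_lt_of_le h1 with rfl | h
      · exact Or.inl rfl
      · exact Or.inr ⟨by omega, h2, h3⟩
  | case2 x hsq hmod q hq ih =>
    intro hi
    rw [pvDivLoop]
    have hq' : ¬ PySem.Int.floordiv n x ≠ x := hq
    simp only [dif_pos hsq, if_pos hmod, if_neg hq', List.mem_cons]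
    rw [ih (by omega)]
    constructor
    · rintro (rfl | ⟨h1, h2, h3⟩)
      · exact ⟨le_refl _, hsq, by simpa using hmod⟩
      · exact ⟨by omega, h2, h3⟩
    · rintro ⟨h1, h2, h3⟩
      rcases eq_or_lt_of_le h1 with rfl | h
      · exact Or.inl rfl
      · exact Or.inr ⟨by omega, h2, h3⟩
  | case3 x hsq hmod ih =>
    intro hi
    rw [pvDivLoop]
    simp only [dif_pos hsq, if_neg hmod]
    rw [ih (by omega)]
    constructor
    · rintro ⟨h1, h2, h3⟩; exact ⟨by omega, h2, h3⟩
    · rintro ⟨h1, h2, h3⟩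
      rcases eq_or_lt_of_le h1 with rfl | h
      · exact absurd (by simpa using h3) (by simpa using hmod)
      · exact ⟨by omega, h2, h3⟩
  | case4 x hsq =>
    intro hi
    rw [pvDivLoop]
    simp only [dif_neg hsq, List.not_mem_nil, false_iff]
    rintro ⟨h1, h2, h3⟩
    exact hsq (le_trans (by nlinarith) h2)

-- membership in the large-divisor list of the loop
theorem pv_mem_snd (n i d : Int) :
    2 ≤ i → (d ∈ (pvDivLoop n i).2 ↔
      ∃ j, i ≤ j ∧ j * j ≤ n ∧ PySem.Int.mod n j = 0 ∧
           d = PySem.Int.floordiv n j ∧ d ≠ j) := by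
  induction i using pvDivLoop.induct n with
  | case1 x hsq hmod q hq ih =>
    intro hi
    rw [pvDivLoop]
    have hq' : PySem.Int.floordiv n x ≠ x := hq
    simp only [dif_pos hsq, if_pos hmod, if_pos hq', List.mem_cons]
    rw [ih (by omega)]
    constructor
    · rintro (rfl | ⟨j, h1, h2, h3, h4, h5⟩)
      · exact ⟨x, le_refl _, hsq, by simpa using hmod, rfl, hq⟩
      · exact ⟨j, by omega, h2, h3, h4, h5⟩
    · rintro ⟨j, h1, h2, h3, h4, h5⟩
      rcases eq_or_lt_of_le h1 with rfl | h
      · exact Or.inl h4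
      · exact Or.inr ⟨j, by omega, h2, h3, h4, h5⟩
  | case2 x hsq hmod q hq ih =>
    intro hi
    rw [pvDivLoop]
    have hq' : ¬ PySem.Int.floordiv n x ≠ x := hq
    simp only [dif_pos hsq, if_pos hmod, if_neg hq']
    rw [ih (by omega)]
    push Not at hq
    constructor
    · rintro ⟨j, h1, h2, h3, h4, h5⟩
      exact ⟨j, by omega, h2, h3, h4, h5⟩
    · rintro ⟨j, h1, h2, h3, h4, h5⟩
      rcases eq_or_lt_of_le h1 with rfl | h
      · exact absurd (h4.trans hq) h5
      · exact ⟨j, by omega, h2, h3, h4, h5⟩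
  | case3 x hsq hmod ih =>
    intro hi
    rw [pvDivLoop]
    simp only [dif_pos hsq, if_neg hmod]
    rw [ih (by omega)]
    constructor
    · rintro ⟨j, h1, h2, h3, h4, h5⟩
      exact ⟨j, by omega, h2, h3, h4, h5⟩
    · rintro ⟨j, h1, h2, h3, h4, h5⟩
      rcases eq_or_lt_of_le h1 with rfl | h
      · exact absurd (by simpa using h3) (by simpa using hmod)
      · exact ⟨j, by omega, h2, h3, h4, h5⟩
  | case4 x hsq =>
    intro hi
    rw [pvDivLoop]
    simp only [dif_neg hsq, List.not_mem_nil, false_iff]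
    rintro ⟨j, h1, h2, h3, h4, h5⟩
    exact hsq (le_trans (by nlinarith) h2)

-- exact cofactors are strictly antitone: x < j, both dividing n > 0 ⟹ n/j < n/x
theorem pv_cof_lt (n x j : Int) (hx : 0 < x) (hxj : x < j) (hdx : x ∣ n) (hdj : j ∣ n)
    (hn : 0 < n) : PySem.Int.floordiv n j < PySem.Int.floordiv n x := by
  rw [PySem.Int.floordiv_eq_ediv_of_pos hx, PySem.Int.floordiv_eq_ediv_of_pos (by omega)]
  obtain ⟨a, ha⟩ := hdx
  obtain ⟨b, hb⟩ := hdj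
  have hja : n / x = a := by rw [ha, Int.mul_ediv_cancel_left a (by omega)]
  have hjb : n / j = b := by rw [hb, Int.mul_ediv_cancel_left b (by omega)]
  rw [hja, hjb]
  by_contra hab
  push Not at hab
  have hb0 : 0 < b := by nlinarith
  nlinarith

-- every large-list element is a divisor strictly above the square root
theorem pv_snd_props (n i d : Int) (hi : 2 ≤ i) (hd : d ∈ (pvDivLoop n i).2) :
    PySem.Int.mod n d = 0 ∧ n < d * d ∧ 2 ≤ d ∧ 2 * d ≤ n := by
  obtain ⟨j, h1, h2, h3, h4, h5⟩ := (pv_mem_snd n i d hi).mp hd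
  have hj0 : 0 < j := by omega
  have hdvd : j ∣ n := (PySem.Int.mod_eq_zero_iff_dvd n j).mp h3
  have hn : 0 < n := by nlinarith
  have hd' : d = n / j := by rw [h4, PySem.Int.floordiv_eq_ediv_of_pos hj0]
  obtain ⟨b, hb⟩ := hdvd
  have hjb : n / j = b := by rw [hb, Int.mul_ediv_cancel_left b (by omega)]
  have hdb : d = b := by rw [hd', hjb]
  have hjd : j ≤ d := by nlinarith [hdb, hb]
  have hjd' : j < d := lt_of_le_of_ne hjd (Ne.symm h5)
  refine ⟨?_, by nlinarith, by omega, by nlinarith⟩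
  · rw [(PySem.Int.mod_eq_zero_iff_dvd n d)]
    exact ⟨j, by rw [hb, hdb]; ring⟩

-- the loop's outputs are strictly ordered (small ascending, large descending)
theorem pv_pairwise (n i : Int) :
    2 ≤ i → (pvDivLoop n i).1.Pairwise (· < ·) ∧ (pvDivLoop n i).2.Pairwise (· > ·) := by
  induction i using pvDivLoop.induct n with
  | case1 x hsq hmod q hq ih =>
    intro hi
    have ihh := ih (by omega)
    have hn : 0 < n := by nlinarith
    have hq' : PySem.Int.floordiv n x ≠ x := hq
    rw [pvDivLoop]
    simp only [dif_pos hsq, if_pos hmod, if_pos hq']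
    constructor
    · refine List.pairwise_cons.mpr ⟨?_, ihh.1⟩
      intro a ha
      have := (pv_mem_fst n (x+1) a (by omega)).mp ha
      omega
    · refine List.pairwise_cons.mpr ⟨?_, ihh.2⟩
      intro b hb
      obtain ⟨j, h1, h2, h3, h4, h5⟩ := (pv_mem_snd n (x+1) b (by omega)).mp hb
      have hdj : j ∣ n := (PySem.Int.mod_eq_zero_iff_dvd n j).mp h3
      have hdx : x ∣ n := (PySem.Int.mod_eq_zero_iff_dvd n x).mp (by simpa using hmod)
      have := pv_cof_lt n x j (by omega) (by omega) hdx hdj hn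
      simp only [gt_iff_lt]
      omega
  | case2 x hsq hmod q hq ih =>
    intro hi
    have ihh := ih (by omega)
    have hq' : ¬ PySem.Int.floordiv n x ≠ x := hq
    rw [pvDivLoop]
    simp only [dif_pos hsq, if_pos hmod, if_neg hq']
    refine ⟨List.pairwise_cons.mpr ⟨?_, ihh.1⟩, ihh.2⟩
    intro a ha
    have := (pv_mem_fst n (x+1) a (by omega)).mp ha
    omega
  | case3 x hsq hmod ih =>
    intro hi
    have ihh := ih (by omega)
    rw [pvDivLoop]
    simp only [dif_pos hsq, if_neg hmod]
    exact ihh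
  | case4 x hsq =>
    intro hi
    rw [pvDivLoop]
    simp only [dif_neg hsq]
    simp

-- the merged loop output collects exactly the divisors in [2, n//2]
theorem pv_mem_merge (n d : Int) :
    (d ∈ (pvDivLoop n 2).1 ∨ d ∈ (pvDivLoop n 2).2) ↔
      (2 ≤ d ∧ d ≤ PySem.Int.truncdiv n 2 ∧ PySem.Int.mod n d = 0) := by
  constructor
  · rintro (hd | hd)
    · obtain ⟨h1, h2, h3⟩ := (pv_mem_fst n 2 d (by omega)).mp hd
      have hn : (0:Int) ≤ n := by nlinarith
      rw [PySem.Int.truncdiv, Int.tdiv_eq_ediv_of_nonneg hn]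
      refine ⟨h1, ?_, h3⟩
      rw [Int.le_ediv_iff_mul_le (by omega : (0:Int) < 2)]
      nlinarith
    · obtain ⟨h3, h2, h1, h4⟩ := pv_snd_props n 2 d (by omega) hd
      have hn : (0:Int) ≤ n := by omega
      rw [PySem.Int.truncdiv, Int.tdiv_eq_ediv_of_nonneg hn]
      refine ⟨h1, ?_, h3⟩
      rw [Int.le_ediv_iff_mul_le (by omega : (0:Int) < 2)]
      omega
  · rintro ⟨h1, h2, h3⟩
    have hn : 0 < n := by
      by_contra hn
      push Not at hn
      have : PySem.Int.truncdiv n 2 ≤ 0 := by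
        rw [PySem.Int.truncdiv]
        have := Int.tdiv_le_tdiv (by norm_num : (0:Int) < 2) hn
        simpa using this
      omega
    have h2' : 2 * d ≤ n := by
      rw [PySem.Int.truncdiv, Int.tdiv_eq_ediv_of_nonneg (by omega)] at h2
      rw [Int.le_ediv_iff_mul_le (by omega : (0:Int) < 2)] at h2
      omega
    have hdvd : d ∣ n := (PySem.Int.mod_eq_zero_iff_dvd n d).mp h3
    rcases Int.lt_or_le n (d * d) with hlt | hle
    · right
      obtain ⟨b, hb⟩ := hdvd
      have hb' : n / d = b := by rw [hb, Int.mul_ediv_cancel_left b (by omega)]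
      have hb2 : 2 ≤ b := by nlinarith
      have hbd : b < d := by nlinarith
      refine (pv_mem_snd n 2 d (by omega)).mpr ⟨b, hb2, by nlinarith, ?_, ?_, by omega⟩
      · rw [PySem.Int.mod_eq_zero_iff_dvd]
        exact ⟨d, by rw [hb]; ring⟩
      · rw [PySem.Int.floordiv_eq_ediv_of_pos (by omega : (0:Int) < b), hb,
            mul_comm d b, Int.mul_ediv_cancel_left d (by omega)]
    · exact Or.inl ((pv_mem_fst n 2 d (by omega)).mpr ⟨h1, hle, h3⟩)

-- per element: A's divisor enumeration equals B's (both strictly increasing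
-- after the leading n, with the same members)
theorem pv_divisors_eq (n : Int) : get_divs n = pvDivisors n := by
  unfold get_divs pvDivisors
  congr 1
  have hpwF : ((PySem.List.pyRange 2 (PySem.Int.truncdiv n 2 + 1) 1).filter
      (fun i => PySem.Int.mod n i == 0)).Pairwise (· < ·) :=
    (PySem.List.pairwise_lt_pyRange_one _ _).filter _
  have hpw12 := pv_pairwise n 2 (by omega)
  have hpwM : ((pvDivLoop n 2).1 ++ (pvDivLoop n 2).2.reverse).Pairwise (· < ·) := by
    rw [List.pairwise_append]
    refine ⟨hpw12.1, ?_, ?_⟩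
    · rw [List.pairwise_reverse]
      exact hpw12.2
    · intro a ha b hb
      rw [List.mem_reverse] at hb
      obtain ⟨h1, h2, h3⟩ := (pv_mem_fst n 2 a (by omega)).mp ha
      obtain ⟨g3, g2, g1, g4⟩ := pv_snd_props n 2 b (by omega) hb
      nlinarith
  have hmem : ∀ d, d ∈ ((PySem.List.pyRange 2 (PySem.Int.truncdiv n 2 + 1) 1).filter
      (fun i => PySem.Int.mod n i == 0)) ↔
      d ∈ ((pvDivLoop n 2).1 ++ (pvDivLoop n 2).2.reverse) := by
    intro d
    rw [List.mem_filter, PySem.List.mem_pyRange_one, List.mem_append, List.mem_reverse,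
        pv_mem_merge]
    simp only [beq_iff_eq]
    omega
  have hperm : ((PySem.List.pyRange 2 (PySem.Int.truncdiv n 2 + 1) 1).filter
      (fun i => PySem.Int.mod n i == 0)).Perm
      ((pvDivLoop n 2).1 ++ (pvDivLoop n 2).2.reverse) :=
    (List.perm_ext_iff_of_nodup (hpwF.imp ne_of_lt) (hpwM.imp ne_of_lt)).mpr hmem
  exact hperm.eq_of_pairwise (fun a b _ _ h h' => absurd h' (lt_asymm h)) hpwF hpwM

-- the two counting steps coincide
theorem pv_step_eq :
    (fun (occ : PySem.Dict Int Int) (div : Int) =>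
      if occ.contains div then occ.insert div (occ.getD div 0 + 1)
      else occ.insert div 1) =
    (fun (c : PySem.Dict Int Int) (d : Int) => c.insert d (c.getD d 0 + 1)) := by
  funext occ div
  cases h : occ.contains div with
  | false => simp [PySem.Dict.getD_of_not_contains occ 0 h]
  | true => simp

-- B's back-to-front output fold, in closed form
theorem pv_fold_out (l : List (Int × Int)) (init : List Int) :
    l.foldl (fun out kv => if kv.2 ≠ 1 then kv.1 :: out else out) init =
      ((l.filter (fun kv => kv.2 ≠ 1)).map (fun kv => kv.1)).reverse ++ init := by
  induction l generalizing init with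
  | nil => simp
  | cons p t ih =>
    rw [List.foldl_cons, ih]
    by_cases h : p.2 = 1 <;> simp [h]

-- ===== VERDICT (by name: the statement is the Claim_ definition above) =====
theorem key_lengths_spec : Claim_equal_key_lengths := by
  intro int_list _
  unfold Spec_key_lengths key_lengths key_lengths_alt
  have hfun : (fun (occ : PySem.Dict Int Int) (_int : Int) =>
      (get_divs _int).foldl (fun occ div =>
        if occ.contains div then occ.insert div (occ.getD div 0 + 1)
        else occ.insert div 1) occ) =
      (fun (c : PySem.Dict Int Int) (n : Int) =>
        (pvDivisors n).foldl (fun c d => c.insert d (c.getD d 0 + 1)) c) := by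
    funext occ m
    rw [pv_divisors_eq, pv_step_eq]
  rw [hfun]
  rw [pv_fold_out]
  simp [List.filter_reverse, List.map_reverse]
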